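-- pv_equiv track=rewrite | github.com/kosiew/alfred-workflows | quick_navigate.py | _delete_script_filter_url
-- ===== SOURCE A (Python) =====
-- def _delete_script_filter_url(items, url):
--     initial_length = len(items)
--     for i, item in enumerate(items):
--         if item['arg'] == url:
--             items.remove(item)
--             break
--     assert len(items) < initial_length
--     return items
-- ===== SOURCE B (Python) =====
-- def _delete_script_filter_url(items, url):
--     # Single filtering pass: rebuild the list skipping the first item whose
--     # 'arg' equals url, then mutate the same list object via slice assignment.
--     removed = False
--     result = []
--     for item in items:
--         if not removed and item['arg'] == url:
--             removed = True
--             continue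
--         result.append(item)
--     items[:] = result
--     assert removed
--     return items
-- ===== Notes on version B (the rewrite author's own statement) =====
-- stated objective: alternative
-- what changed: find-then-list.remove (scan for the match, then a second scan to remove the equal element) is replaced by one filtering pass that rebuilds the list with the first match skipped and writes it back by slice assignment
import Mathlib
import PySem

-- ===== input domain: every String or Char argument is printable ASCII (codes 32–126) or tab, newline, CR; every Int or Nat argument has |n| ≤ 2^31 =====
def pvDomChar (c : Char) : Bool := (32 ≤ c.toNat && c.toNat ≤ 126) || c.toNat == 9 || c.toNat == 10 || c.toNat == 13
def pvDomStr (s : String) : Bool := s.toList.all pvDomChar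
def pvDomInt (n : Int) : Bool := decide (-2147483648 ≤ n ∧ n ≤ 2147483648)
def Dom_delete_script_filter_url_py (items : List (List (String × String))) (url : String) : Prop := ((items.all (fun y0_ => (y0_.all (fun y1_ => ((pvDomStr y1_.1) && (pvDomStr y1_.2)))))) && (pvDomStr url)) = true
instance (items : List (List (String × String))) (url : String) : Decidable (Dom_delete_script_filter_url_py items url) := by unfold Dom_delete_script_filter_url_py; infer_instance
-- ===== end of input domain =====

-- B rebuilds the list in ONE filtering pass (skip-first-match) instead of A's find-then-list.remove;
-- both mutate the caller's list in place in Python — the equivalence proved here is about the returned value.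

-- dict lookup item['arg'] on the association-list representation: first pair with key "arg"
def pvArg (item : List (String × String)) : Option String :=
  (item.find? (fun p => p.1 == "arg")).map (·.2)

-- ===== PORT A =====
-- the `for i, item in enumerate(items): if item['arg'] == url: … break` scan: first matching item
def pvFindA (url : String) : List (List (String × String)) → Option (List (String × String))
  | [] => none
  | d :: rest => if pvArg d = some url then some d else pvFindA url rest

def delete_script_filter_url_py (items : List (List (String × String))) (url : String) : List (List (String × String)) :=
  match pvFindA url items with
  | some item => (PySem.List.remove? items item).getD items  -- items.remove(item); remove? is some here since item ∈ items
  | none => items  -- loop fell through: Python's assert fails (excluded by Pre_)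

-- ===== PORT B =====
def delete_script_filter_url_py_alt (items : List (List (String × String))) (url : String) : List (List (String × String)) :=
  -- removed = False; result = []; one pass appending all but the first match; items[:] = result
  (items.foldl
    (fun (st : Bool × List (List (String × String))) item =>
      if !st.1 && pvArg item == some url then (true, st.2) else (st.1, st.2 ++ [item]))
    (false, [])).2

-- ===== PRECONDITION & SPEC =====
-- Pre_ excludes exactly the inputs where Python A raises: no item matches url (assert fails),
-- or some item scanned before the first match lacks an 'arg' key (KeyError).
def Pre_delete_script_filter_url_py (items : List (List (String × String))) (url : String) : Prop :=
  (items.takeWhile (fun d => pvArg d != some url)).length < items.length ∧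
  ∀ d ∈ items.takeWhile (fun d => pvArg d != some url), (pvArg d).isSome

instance (items : List (List (String × String))) (url : String) : Decidable (Pre_delete_script_filter_url_py items url) := by unfold Pre_delete_script_filter_url_py; infer_instance

def pvWitness_delete_script_filter_url_py : (List (List (String × String))) × String :=
  ([[("arg", "a")], [("arg", "b")]], "b")

def Spec_delete_script_filter_url_py (items : List (List (String × String))) (url : String) (out : List (List (String × String))) : Prop := out = delete_script_filter_url_py_alt items url
instance (items : List (List (String × String))) (url : String) (out : List (List (String × String))) : Decidable (Spec_delete_script_filter_url_py items url out) := by unfold Spec_delete_script_filter_url_py; infer_instance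

-- ===== CLAIM (what is proved, stated in full; the proofs are below) =====
def Claim_equal_delete_script_filter_url_py : Prop := ∀ (items : List (List (String × String))) (url : String), Dom_delete_script_filter_url_py items url → Pre_delete_script_filter_url_py items url → Spec_delete_script_filter_url_py items url (delete_script_filter_url_py items url)

-- ===== LEMMAS AND PROOFS =====

-- once removed is true, B's fold only appends
theorem pvFoldB_true (url : String) (l : List (List (String × String))) (acc : List (List (String × String))) :
    l.foldl
      (fun (st : Bool × List (List (String × String))) item =>
        if !st.1 && pvArg item == some url then (true, st.2) else (st.1, st.2 ++ [item]))
      (true, acc) = (true, acc ++ l) := by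
  induction l generalizing acc with
  | nil => simp
  | cons d rest ih =>
    rw [List.foldl_cons, if_neg (by simp : ¬ ((!((true : Bool), acc).1 && pvArg d == some url) = true))]
    show List.foldl _ (true, acc ++ [d]) rest = _
    rw [ih]
    simp

-- B's fold from (false, acc): result is acc ++ (l with its first match removed), or acc ++ l if no match
theorem pvFoldB_false (url : String) (l : List (List (String × String))) (acc : List (List (String × String))) :
    (l.foldl
      (fun (st : Bool × List (List (String × String))) item =>
        if !st.1 && pvArg item == some url then (true, st.2) else (st.1, st.2 ++ [item]))
      (false, acc)).2 =
    (match pvFindA url l with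
     | some item => acc ++ ((PySem.List.remove? l item).getD l)
     | none => acc ++ l) := by
  induction l generalizing acc with
  | nil => simp [pvFindA]
  | cons d rest ih =>
    by_cases h : pvArg d = some url
    · have hfind : pvFindA url (d :: rest) = some d := by simp [pvFindA, h]
      rw [List.foldl_cons, if_pos (by simp [h] : (!((false : Bool), acc).1 && pvArg d == some url) = true)]
      show (List.foldl _ (true, acc) rest).2 = _
      rw [pvFoldB_true, hfind]
      simp
    · have hne : pvFindA url (d :: rest) = pvFindA url rest := by simp [pvFindA, h]
      rw [List.foldl_cons, if_neg (by simp [h] : ¬ ((!((false : Bool), acc).1 && pvArg d == some url) = true))]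
      show (List.foldl _ (false, acc ++ [d]) rest).2 = _
      rw [ih]
      cases hf : pvFindA url rest with
      | none => simp [hne, hf]
      | some item =>
        -- d ≠ item: item matches url, d does not
        have harg : pvArg item = some url := by
          clear ih hne
          induction rest with
          | nil => simp [pvFindA] at hf
          | cons e r ihr =>
            by_cases he : pvArg e = some url
            · simp [pvFindA, he] at hf; subst hf; exact he
            · simp [pvFindA, he] at hf; exact ihr hf
        have hdne : d ≠ item := fun he => h (he ▸ harg)
        have hstep : PySem.List.remove? (d :: rest) item = (PySem.List.remove? rest item).map (d :: ·) := by
          simp [PySem.List.remove?, List.idxOf?_cons, hdne, Option.map_map, Function.comp_def]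
        rw [hne, hf]
        show acc ++ [d] ++ (PySem.List.remove? rest item).getD rest
            = acc ++ (PySem.List.remove? (d :: rest) item).getD (d :: rest)
        rw [hstep]
        cases hr : PySem.List.remove? rest item with
        | none => simp
        | some r => simp

-- ===== VERDICT (by name: the statement is the Claim_ definition above) =====
theorem delete_script_filter_url_py_spec : Claim_equal_delete_script_filter_url_py := by
  intro items url _ _
  unfold Spec_delete_script_filter_url_py delete_script_filter_url_py delete_script_filter_url_py_alt
  rw [pvFoldB_false]
  cases pvFindA url items <;> simp
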